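-- pv_equiv track=rewrite | github.com/dgski/automate-boring-python | lists.py | stringer
-- ===== SOURCE A (Python) =====
-- def stringer(listofthings):
--
-- 	string = ""
--
-- 	for i,x in enumerate(listofthings):
-- 		if i == len(listofthings) - 1:
-- 			string += "and " + x + "."
-- 		elif i == 0:
-- 			string += x[0].upper() + x[1:] + " "
-- 		else:
-- 			string += x + ", "
--
-- 	return string
-- ===== SOURCE B (Python) =====
-- def stringer(listofthings):
--     if not listofthings:
--         return ""
--     if len(listofthings) == 1:
--         return "and " + listofthings[0] + "."
--     first = listofthings[0]
--     head = first[0].upper() + first[1:] + " "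
--     middle = "".join(m + ", " for m in listofthings[1:-1])
--     return head + middle + "and " + listofthings[-1] + "."
-- ===== Notes on version B (the rewrite author's own statement) =====
-- stated objective: simpler
-- what changed: Replaces the per-index enumerate loop with three branch comparisons per element by a shape decomposition: guard empty and singleton lists, then build the sentence from the head, a join over the middle slice things[1:-1], and the last element.
import Mathlib
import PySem

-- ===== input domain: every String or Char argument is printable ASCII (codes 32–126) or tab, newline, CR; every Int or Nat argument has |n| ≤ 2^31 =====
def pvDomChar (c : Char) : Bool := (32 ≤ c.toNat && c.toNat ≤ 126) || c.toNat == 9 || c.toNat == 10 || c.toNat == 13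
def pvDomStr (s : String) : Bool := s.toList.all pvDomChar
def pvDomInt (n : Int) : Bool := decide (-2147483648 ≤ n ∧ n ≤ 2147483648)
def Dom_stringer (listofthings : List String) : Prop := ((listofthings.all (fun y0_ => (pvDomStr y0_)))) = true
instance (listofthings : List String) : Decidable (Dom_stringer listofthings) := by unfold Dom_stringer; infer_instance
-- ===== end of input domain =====

-- B builds the sentence by shape decomposition (head / middle slice join / last) instead of A's
-- per-index enumerate loop; objective: simpler.  Both raise IndexError when len ≥ 2 and the first
-- element is "", so Pre_ excludes exactly those inputs.

-- ===== PORT A =====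
-- x[0].upper() + x[1:]  (both Python versions contain this exact expression; "" when x is empty is
-- unreachable under Pre_, where Python raises IndexError)
def capFirst (x : String) : String :=
  (match PySem.Str.pyGet? x 0 with
   | some c => String.singleton (PySem.Chars.upperChar c)
   | none => "") ++ PySem.Str.slice x (some 1) none

def stringer (listofthings : List String) : String :=
  (PySem.List.enumerate listofthings).foldl
    (fun s p =>
      if p.1 = (listofthings.length : Int) - 1 then s ++ ("and " ++ p.2 ++ ".")
      else if p.1 = 0 then s ++ (capFirst p.2 ++ " ")
      else s ++ (p.2 ++ ", ")) ""

-- ===== PORT B =====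
def stringer_alt (listofthings : List String) : String :=
  if listofthings = [] then ""
  else if listofthings.length = 1 then "and " ++ PySem.List.pyGetD listofthings 0 "" ++ "."
  else
    let first := PySem.List.pyGetD listofthings 0 ""
    let head := capFirst first ++ " "
    let middle := (PySem.List.slice listofthings (some 1) (some (-1))).foldl
        (fun s m => s ++ (m ++ ", ")) ""
    head ++ middle ++ "and " ++ PySem.List.pyGetD listofthings (-1) "" ++ "."

-- ===== PRECONDITION & SPEC =====
-- Pre_ excludes exactly the inputs on which Python A raises IndexError (first element "" in a
-- list of length ≥ 2); Python B raises there too.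
def Pre_stringer (listofthings : List String) : Prop :=
  listofthings.length ≤ 1 ∨ listofthings.headD "" ≠ ""
instance (listofthings : List String) : Decidable (Pre_stringer listofthings) := by
  unfold Pre_stringer; infer_instance
def pvWitness_stringer : List String := ["apples", "bread", "milk"]
def Spec_stringer (listofthings : List String) (out : String) : Prop := out = stringer_alt listofthings
instance (listofthings : List String) (out : String) : Decidable (Spec_stringer listofthings out) := by unfold Spec_stringer; infer_instance

-- ===== CLAIM (what is proved, stated in full; the proofs are below) =====
def Claim_equal_stringer : Prop := ∀ (listofthings : List String), Dom_stringer listofthings → Pre_stringer listofthings → Spec_stringer listofthings (stringer listofthings)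

-- ===== LEMMAS AND PROOFS =====

-- A's loop body, abstracted over the total length n.
def stepA (n : Int) (s : String) (p : Int × String) : String :=
  if p.1 = n - 1 then s ++ ("and " ++ p.2 ++ ".")
  else if p.1 = 0 then s ++ (capFirst p.2 ++ " ")
  else s ++ (p.2 ++ ", ")

theorem stringer_eq_stepA (l : List String) :
    stringer l = (PySem.List.enumerate l).foldl (stepA (l.length : Int)) "" := rfl

def joinMid (mid : List String) : String :=
  mid.foldl (fun t m => t ++ (m ++ ", ")) ""

theorem foldl_join_append (mid : List String) : ∀ (a b : String),
    mid.foldl (fun t m => t ++ (m ++ ", ")) (a ++ b)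
      = a ++ mid.foldl (fun t m => t ++ (m ++ ", ")) b := by
  induction mid with
  | nil => intro a b; rfl
  | cons c mid iht => intro a b; simp only [List.foldl_cons, String.append_assoc, iht]

-- A's loop on the tail mid ++ [last], starting at index k with 1 ≤ k and k + |mid| + 1 = n.
theorem loop_mid (n : Int) (last : String) : ∀ (mid : List String) (k : Int) (s : String),
    1 ≤ k → k + mid.length + 1 = n →
      (PySem.List.enumerate (mid ++ [last]) k).foldl (stepA n) s
        = s ++ joinMid mid ++ ("and " ++ last ++ ".") := by
  intro mid
  induction mid with
  | nil =>
    intro k s hk hn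
    simp only [List.length_nil, Nat.cast_zero, add_zero] at hn
    have hk' : k = n - 1 := by omega
    simp [PySem.List.enumerate_cons, PySem.List.enumerate_nil, stepA, hk', joinMid]
  | cons m mid ih =>
    intro k s hk hn
    simp only [List.length_cons, Nat.cast_add, Nat.cast_one] at hn
    have hm : (0:Int) ≤ mid.length := Int.natCast_nonneg _
    have h1 : ¬ (k = n - 1) := by omega
    have h0 : ¬ (k = 0) := by omega
    simp only [List.cons_append, PySem.List.enumerate_cons, List.foldl_cons]
    rw [show stepA n s (k, m) = s ++ (m ++ ", ") by simp [stepA, h1, h0]]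
    rw [ih (k + 1) _ (by omega) (by omega)]
    have : joinMid (m :: mid) = (m ++ ", ") ++ joinMid mid := by
      unfold joinMid
      simp only [List.foldl_cons]
      rw [show ("" : String) ++ (m ++ ", ") = (m ++ ", ") ++ "" by simp]
      exact foldl_join_append mid (m ++ ", ") ""
    rw [this]
    simp [String.append_assoc]

theorem stringer_cons (x last : String) (mid : List String) :
    stringer (x :: (mid ++ [last]))
      = (capFirst x ++ " ") ++ joinMid mid ++ ("and " ++ last ++ ".") := by
  have hn : (((x :: (mid ++ [last])).length : Nat) : Int) = (mid.length : Int) + 2 := by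
    simp; omega
  rw [stringer_eq_stepA, hn, PySem.List.enumerate_cons]
  simp only [List.foldl_cons]
  have hm : (0:Int) ≤ mid.length := Int.natCast_nonneg _
  rw [show stepA ((mid.length : Int) + 2) "" (0, x) = "" ++ (capFirst x ++ " ") by
    simp only [stepA]
    rw [if_neg (by omega : ¬ ((0:Int) = (mid.length : Int) + 2 - 1))]
    simp]
  rw [show (0:Int) + 1 = 1 by norm_num]
  rw [loop_mid _ last mid 1 _ (by omega) (by omega)]
  simp

theorem stringer_alt_cons (x last : String) (mid : List String) :
    stringer_alt (x :: (mid ++ [last]))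
      = (capFirst x ++ " ") ++ joinMid mid ++ ("and " ++ last ++ ".") := by
  unfold stringer_alt
  rw [if_neg (by simp), if_neg (by simp)]
  rw [show PySem.List.slice (x :: (mid ++ [last])) (some 1) (some (-1)) = mid by
    simp [PySem.List.slice]]
  rw [show x :: (mid ++ [last]) = (x :: mid) ++ [last] by simp]
  rw [PySem.List.pyGetD_neg_one_append_singleton]
  rw [show PySem.List.pyGetD ((x :: mid) ++ [last]) 0 "" = x from PySem.List.pyGetD_zero_cons ..]
  simp [joinMid, String.append_assoc]

-- ===== VERDICT (by name: the statement is the Claim_ definition above) =====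
theorem stringer_spec : Claim_equal_stringer := by
  unfold Claim_equal_stringer
  intro l _hdom _hpre
  unfold Spec_stringer
  match l with
  | [] => rfl
  | [x] =>
    simp [stringer, stringer_alt, PySem.List.enumerate_cons, PySem.List.enumerate_nil]
  | x :: y :: rest =>
    obtain ⟨mid, last, hml⟩ : ∃ mid last, y :: rest = mid ++ [last] :=
      ⟨(y :: rest).dropLast, (y :: rest).getLast (by simp),
        (List.dropLast_append_getLast (by simp)).symm⟩
    rw [show (x :: y :: rest) = x :: (mid ++ [last]) by rw [hml]]
    rw [stringer_cons, stringer_alt_cons]
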